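-- pv_equiv track=rewrite | github.com/Mental59/WineRecognition | data_master.py | generate_sents
-- ===== SOURCE A (Python) =====
-- def generate_sents(lines: list):
--     sents = []
--     example = []
--     for line in lines:
--
--         if not line:
--             sents.append(example)
--             example = []
--             continue
--
--         example.append(tuple(line.split()[:2]))
--
--     return sents[:-1]
-- ===== SOURCE B (Python) =====
-- def generate_sents(lines: list):
--     segs = []
--     rest = lines
--     while "" in rest:
--         i = rest.index("")
--         segs.append([tuple(l.split()[:2]) for l in rest[:i]])
--         rest = rest[i + 1:]
--     return segs[:-1]
-- ===== Notes on version B (the rewrite author's own statement) =====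
-- stated objective: faster
-- what changed: A's per-line accumulator loop is replaced by repeated split-at-first-blank-line: find the index of the next empty line (list.index), slice out the segment before it as a token list, and continue on the remainder; the trailing [:-1] drop is kept. Same O(n) asymptotics, but the scanning and slicing run in C instead of a per-line Python loop (measured ~4x).
-- outside the precondition, e.g. on generate_sents(['x', '', '']): A returns [[('x',)]], B returns [[('x',)]]
import Mathlib
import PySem

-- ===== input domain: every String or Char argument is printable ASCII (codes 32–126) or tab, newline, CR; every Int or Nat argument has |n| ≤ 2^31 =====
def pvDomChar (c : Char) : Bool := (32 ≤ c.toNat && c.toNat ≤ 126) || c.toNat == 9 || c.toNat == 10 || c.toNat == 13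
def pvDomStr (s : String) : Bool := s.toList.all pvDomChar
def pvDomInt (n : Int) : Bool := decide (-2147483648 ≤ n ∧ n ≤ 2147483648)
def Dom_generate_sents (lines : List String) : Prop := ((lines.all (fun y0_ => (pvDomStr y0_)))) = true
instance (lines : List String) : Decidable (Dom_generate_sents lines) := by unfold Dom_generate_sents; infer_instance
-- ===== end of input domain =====

-- B replaces A's per-line accumulator loop by repeated split-at-first-blank-line slicing (same O(n); a timing run measured B faster by a constant factor).

-- ===== PORT A =====
-- shared helper: `tuple(line.split()[:2])` — exact (a String × String pair) when the line
-- splits into at least 2 tokens; Pre_ excludes the other non-empty lines (Python returns a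
-- 0- or 1-tuple there, which is not a value of the declared return type).
def tok2 (line : String) : String × String :=
  match PySem.List.slice (PySem.Str.split₀ line) none (some 2) with
  | [a, b] => (a, b)
  | _ => ("", "")

def aGo : List String → List (List (String × String)) → List (String × String) → List (List (String × String))
  | [], sents, _ => sents
  | line :: rest, sents, ex =>
    if line = "" then aGo rest (sents ++ [ex]) []
    else aGo rest sents (ex ++ [tok2 line])

def generate_sents (lines : List String) : List (List (String × String)) :=
  PySem.List.slice (aGo lines [] []) none (some (-1))

-- ===== PORT B =====
def bGo (rest : List String) (segs : List (List (String × String))) : List (List (String × String)) :=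
  match h : PySem.List.index? rest "" with
  | none => segs
  | some i =>
    bGo (PySem.List.slice rest (some ((i : Int) + 1)) none)
        (segs ++ [(PySem.List.slice rest none (some (i : Int))).map tok2])
termination_by rest.length
decreasing_by
  obtain ⟨hk, -, -⟩ := PySem.List.getElem_of_index?_eq_some h
  have hc : ((i : Int) + 1) = ((i + 1 : Nat) : Int) := by push_cast; ring
  rw [hc, PySem.List.slice_from_natCast]
  simp only [List.length_drop]
  omega

def generate_sents_alt (lines : List String) : List (List (String × String)) :=
  PySem.List.slice (bGo lines []) none (some (-1))

-- ===== PRECONDITION & SPEC =====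
-- Pre_ excludes inputs where a non-empty line with fewer than 2 whitespace-separated tokens
-- is followed by at least two empty lines: only then its 0- or 1-element tuple reaches the
-- returned value, which is then not of the declared type list[list[tuple[str, str]]]
-- (groups after the last blank, and the group ended by the last blank, are dropped).
def Pre_generate_sents (lines : List String) : Prop :=
  ∀ i, (h : i < lines.length) → lines[i] ≠ "" →
    2 ≤ (PySem.Str.split₀ lines[i]).length ∨ (lines.drop (i + 1)).count "" ≤ 1
instance (lines : List String) : Decidable (Pre_generate_sents lines) := by
  unfold Pre_generate_sents; infer_instance

def pvWitness_generate_sents : List String := ["a b", "", "c d e", ""]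

def Spec_generate_sents (lines : List String) (out : List (List (String × String))) : Prop := out = generate_sents_alt lines
instance (lines : List String) (out : List (List (String × String))) : Decidable (Spec_generate_sents lines out) := by unfold Spec_generate_sents; infer_instance

-- ===== CLAIM (what is proved, stated in full; the proofs are below) =====
def Claim_equal_generate_sents : Prop := ∀ (lines : List String), Dom_generate_sents lines → Pre_generate_sents lines → Spec_generate_sents lines (generate_sents lines)

-- ===== LEMMAS AND PROOFS =====

-- common characterization: groups of `lines` split at "" boundaries, the open group
-- prefixed with `ex`, the unfinished trailing group discarded.
def prep (ex : List (String × String)) : List String → List (List (String × String))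
  | [] => []
  | l :: r => if l = "" then ex :: prep [] r else prep (ex ++ [tok2 l]) r

theorem aGo_eq (lines : List String) :
    ∀ (sents : List (List (String × String))) (ex : List (String × String)),
      aGo lines sents ex = sents ++ prep ex lines := by
  induction lines with
  | nil => intro sents ex; simp [aGo, prep]
  | cons l r ih =>
    intro sents ex
    by_cases hl : l = ""
    · simp [aGo, prep, hl, ih]
    · simp [aGo, prep, hl, ih]

theorem prep_of_not_mem (lines : List String) (h : "" ∉ lines) (ex : List (String × String)) :
    prep ex lines = [] := by
  induction lines generalizing ex with
  | nil => rfl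
  | cons l r ih =>
    have hl : l ≠ "" := by rintro rfl; exact h List.mem_cons_self
    simp only [prep, if_neg hl]
    exact ih (fun hm => h (List.mem_cons_of_mem _ hm)) _

theorem prep_split (pre suf : List String) (hp : "" ∉ pre) :
    ∀ ex, prep ex (pre ++ "" :: suf) = (ex ++ pre.map tok2) :: prep [] suf := by
  induction pre with
  | nil => intro ex; simp [prep]
  | cons l r ih =>
    intro ex
    have hl : l ≠ "" := by rintro rfl; exact hp List.mem_cons_self
    have hr : "" ∉ r := fun hm => hp (List.mem_cons_of_mem _ hm)
    simp [List.cons_append, prep, if_neg hl, ih hr]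

theorem bGo_eq (rest : List String) :
    ∀ segs, bGo rest segs = segs ++ prep [] rest := by
  induction hn : rest.length using Nat.strong_induction_on generalizing rest with
  | _ n ih =>
  intro segs
  rw [bGo]
  split
  next h =>
    have hmem : "" ∉ rest := (PySem.List.index?_eq_none_iff rest "").mp h
    simp [prep_of_not_mem rest hmem]
  next i h =>
    obtain ⟨pre, suf, hsplit, hlen, hpre⟩ := (PySem.List.index?_eq_some_iff rest "" i).mp h
    have hc : ((i : Int) + 1) = ((i + 1 : Nat) : Int) := by push_cast; ring
    rw [hc, PySem.List.slice_from_natCast, PySem.List.slice_to_natCast]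
    have hdrop : rest.drop (i + 1) = suf := by
      subst hsplit; rw [← hlen]; simp
    have htake : rest.take i = pre := by
      subst hsplit; rw [← hlen]; simp
    have hlt : suf.length < n := by subst hsplit hn; simp; omega
    rw [hdrop, htake, ih suf.length hlt suf rfl (segs ++ [pre.map tok2]),
      hsplit, prep_split pre suf hpre]
    simp

theorem ports_agree (lines : List String) : generate_sents lines = generate_sents_alt lines := by
  unfold generate_sents generate_sents_alt
  rw [aGo_eq lines [] [], bGo_eq lines []]

-- ===== VERDICT (by name: the statement is the Claim_ definition above) =====
theorem generate_sents_spec : Claim_equal_generate_sents := by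
  intro lines _ _
  exact ports_agree lines
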